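-- pv_equiv track=rewrite | github.com/zdhughes5/ADAPT_software | scrap/verify_fix.py | generate_odd_even_list
-- ===== SOURCE A (Python) =====
-- def generate_odd_even_list(length, offset=0, even_first=False):
--     numbers = list(range(offset, offset + length))
--     odd_values = [n for n in numbers if n % 2 != 0]
--     even_values = [n for n in numbers if n % 2 == 0]
--     if even_first:
--         return even_values + odd_values
--     else:
--         return odd_values + even_values
-- ===== SOURCE B (Python) =====
-- def generate_odd_even_list(length, offset=0, even_first=False):
--     stop = offset + length
--     first_odd = offset if offset % 2 != 0 else offset + 1
--     first_even = offset if offset % 2 == 0 else offset + 1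
--     odd_values = list(range(first_odd, stop, 2))
--     even_values = list(range(first_even, stop, 2))
--     if even_first:
--         return even_values + odd_values
--     else:
--         return odd_values + even_values
-- ===== Notes on version B (the rewrite author's own statement) =====
-- stated objective: faster
-- what changed: Replaces the materialised full range plus two modulo-filter scans with direct stride-2 range enumeration from the first odd/even value, so no intermediate list and no per-element parity test.
import Mathlib
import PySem

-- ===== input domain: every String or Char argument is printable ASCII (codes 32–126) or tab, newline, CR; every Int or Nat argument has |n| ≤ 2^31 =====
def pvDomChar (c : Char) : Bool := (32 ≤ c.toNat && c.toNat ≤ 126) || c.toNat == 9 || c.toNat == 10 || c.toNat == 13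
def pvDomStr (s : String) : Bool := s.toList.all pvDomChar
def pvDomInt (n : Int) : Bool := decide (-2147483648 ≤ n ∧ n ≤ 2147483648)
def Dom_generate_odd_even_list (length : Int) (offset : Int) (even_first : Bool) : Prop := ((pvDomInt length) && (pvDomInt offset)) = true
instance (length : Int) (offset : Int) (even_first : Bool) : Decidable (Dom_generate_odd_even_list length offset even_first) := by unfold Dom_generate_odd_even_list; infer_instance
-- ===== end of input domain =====

-- B replaces A's full-range list and two parity-filter scans by direct stride-2 range
-- construction from the first odd / first even value (objective: faster by a constant factor).

-- ===== PORT A =====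
def generate_odd_even_list (length : Int) (offset : Int) (even_first : Bool) : List Int :=
  let numbers := PySem.List.pyRange offset (offset + length) 1
  let odd_values := numbers.filter (fun n => PySem.Int.mod n 2 != 0)
  let even_values := numbers.filter (fun n => PySem.Int.mod n 2 == 0)
  if even_first then even_values ++ odd_values else odd_values ++ even_values

-- ===== PORT B =====
def generate_odd_even_list_alt (length : Int) (offset : Int) (even_first : Bool) : List Int :=
  let stop := offset + length
  let first_odd := if PySem.Int.mod offset 2 != 0 then offset else offset + 1
  let first_even := if PySem.Int.mod offset 2 == 0 then offset else offset + 1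
  let odd_values := PySem.List.pyRange first_odd stop 2
  let even_values := PySem.List.pyRange first_even stop 2
  if even_first then even_values ++ odd_values else odd_values ++ even_values

-- ===== PRECONDITION & SPEC =====
def Spec_generate_odd_even_list (length : Int) (offset : Int) (even_first : Bool) (out : List Int) : Prop := out = generate_odd_even_list_alt length offset even_first
instance (length : Int) (offset : Int) (even_first : Bool) (out : List Int) : Decidable (Spec_generate_odd_even_list length offset even_first out) := by unfold Spec_generate_odd_even_list; infer_instance

-- ===== CLAIM (what is proved, stated in full; the proofs are below) =====
def Claim_equal_generate_odd_even_list : Prop := ∀ (length : Int) (offset : Int) (even_first : Bool), Dom_generate_odd_even_list length offset even_first → Spec_generate_odd_even_list length offset even_first (generate_odd_even_list length offset even_first)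

-- ===== LEMMAS AND PROOFS =====

theorem pvMod2 (a : Int) : PySem.Int.mod a 2 = a % 2 := by
  simp [PySem.Int.mod, Int.fmod_eq_emod]

theorem pyRange_two_nil {a b : Int} (h : b ≤ a) : PySem.List.pyRange a b 2 = [] := by
  rw [PySem.List.pyRange_of_pos a b (by norm_num), if_neg (by omega)]
  simp

theorem pyRange_two_cons {a b : Int} (h : a < b) :
    PySem.List.pyRange a b 2 = a :: PySem.List.pyRange (a + 2) b 2 := by
  rw [PySem.List.pyRange_of_pos a b (by norm_num),
      PySem.List.pyRange_of_pos (a + 2) b (by norm_num)]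
  have hcount : (if a < b then ((b - a + 2 - 1) / 2).toNat else 0)
      = (if a + 2 < b then ((b - (a + 2) + 2 - 1) / 2).toNat else 0) + 1 := by
    split_ifs <;> omega
  rw [hcount, List.range_succ_eq_map]
  simp only [List.map_cons, List.map_map, Nat.cast_zero, mul_zero, add_zero, List.cons.injEq,
    true_and]
  apply List.map_congr_left
  intro k _
  simp [Function.comp]
  push_cast
  ring

theorem filter_parity (n : Nat) : ∀ a b : Int, (b - a).toNat = n →
    ((PySem.List.pyRange a b 1).filter (fun x => PySem.Int.mod x 2 != 0)
        = PySem.List.pyRange (if PySem.Int.mod a 2 != 0 then a else a + 1) b 2)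
  ∧ ((PySem.List.pyRange a b 1).filter (fun x => PySem.Int.mod x 2 == 0)
        = PySem.List.pyRange (if PySem.Int.mod a 2 == 0 then a else a + 1) b 2) := by
  induction n with
  | zero =>
    intro a b h
    have hba : b ≤ a := by omega
    rw [PySem.List.pyRange_one_eq_nil hba]
    constructor <;> · rw [List.filter_nil]
                      split <;> [exact (pyRange_two_nil hba).symm;
                                 exact (pyRange_two_nil (by omega)).symm]
  | succ n ih =>
    intro a b h
    have hab : a < b := by omega
    obtain ⟨ihodd, iheven⟩ := ih (a + 1) b (by omega)
    rw [PySem.List.pyRange_one_cons hab]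
    simp only [List.filter_cons]
    simp only [pvMod2] at ihodd iheven ⊢
    have e2 : a + 1 + 1 = a + 2 := by ring
    by_cases hpar : a % 2 = 0
    · have h12 : (a + 1) % 2 = 1 := by omega
      simp only [hpar, h12] at ihodd iheven ⊢
      norm_num at ihodd iheven ⊢
      rw [e2] at iheven
      exact ⟨ihodd, by rw [iheven, ← pyRange_two_cons hab]⟩
    · have h1 : a % 2 = 1 := by omega
      have h12 : (a + 1) % 2 = 0 := by omega
      simp only [h1, h12] at ihodd iheven ⊢
      norm_num at ihodd iheven ⊢
      rw [e2] at ihodd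
      exact ⟨by rw [ihodd, ← pyRange_two_cons hab], iheven⟩

-- ===== VERDICT (by name: the statement is the Claim_ definition above) =====
theorem generate_odd_even_list_spec : Claim_equal_generate_odd_even_list := by
  intro length offset even_first _
  unfold Spec_generate_odd_even_list generate_odd_even_list generate_odd_even_list_alt
  obtain ⟨hodd, heven⟩ := filter_parity ((offset + length - offset).toNat) offset (offset + length) rfl
  simp only [hodd, heven]
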